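-- pv_equiv track=rewrite | github.com/Vi-fly/Astrologer | backend/main.py | determine_stage
-- ===== SOURCE A (Python) =====
-- from typing import List, Optional, Dict, Any
--
-- def determine_stage(messages: List[Dict[str, Any]]) -> str:
--     """Determine the current conversation stage"""
--     if not messages:
--         return "greeting"
--
--     # Count user messages to determine stage
--     user_messages = [msg for msg in messages if msg["role"] == "user"]
--     message_count = len(user_messages)
--
--     # Ask questions one by one - each question gets its own stage
--     if message_count <= 1:
--         return "greeting"
--     elif message_count == 2:
--         return "question_1"  # How long have you been facing this issue?
--     elif message_count == 3:
--         return "question_2"  # How does it affect your daily life?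
--     elif message_count == 4:
--         return "question_3"  # What have you already tried?
--     elif message_count == 5:
--         return "question_4"  # How do you feel emotionally?
--     elif message_count == 6:
--         return "question_5"  # Specific symptoms or manifestations?
--     elif message_count == 7:
--         return "analysis"
--     else:
--         return "ongoing"
-- ===== SOURCE B (Python) =====
-- def determine_stage(messages):
--     # State machine: walk the conversation, advancing through a queue of
--     # remaining stages; each user message consumes the front stage unless
--     # only the terminal "ongoing" stage is left. No counting, no dispatch.
--     stages = ["greeting", "greeting", "question_1", "question_2", "question_3",
--               "question_4", "question_5", "analysis", "ongoing"]
--     for msg in messages: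
--         if msg["role"] == "user" and len(stages) > 1:
--             stages.pop(0)
--     return stages[0]
-- ===== Notes on version B (the rewrite author's own statement) =====
-- stated objective: alternative
-- what changed: Replaced the count-then-eight-way-dispatch with a state machine that walks the messages once, consuming the front of a queue of remaining stages on each user message (saturating at the last stage), and returns the stage left at the front.
import Mathlib
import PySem

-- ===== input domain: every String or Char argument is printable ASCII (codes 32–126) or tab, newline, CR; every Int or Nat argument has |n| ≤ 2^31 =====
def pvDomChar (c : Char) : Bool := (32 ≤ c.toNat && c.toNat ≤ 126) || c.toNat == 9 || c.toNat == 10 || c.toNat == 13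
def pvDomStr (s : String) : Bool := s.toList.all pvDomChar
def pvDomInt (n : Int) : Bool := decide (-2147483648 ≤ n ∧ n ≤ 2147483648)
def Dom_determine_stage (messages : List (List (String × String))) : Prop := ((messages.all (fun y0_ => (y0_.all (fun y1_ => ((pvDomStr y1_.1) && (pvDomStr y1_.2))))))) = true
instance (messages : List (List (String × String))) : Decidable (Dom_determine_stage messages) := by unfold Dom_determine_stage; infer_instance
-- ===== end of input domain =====

-- B replaces count-then-dispatch with a state machine consuming a queue of remaining stages (alternative decomposition).
-- ===== PORT A =====
def determine_stage (messages : List (List (String × String))) : String :=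
  if messages = [] then "greeting"
  else
    let user_messages := messages.filter (fun msg => msg.lookup "role" == some "user")
    let message_count := user_messages.length
    if message_count ≤ 1 then "greeting"
    else if message_count = 2 then "question_1"
    else if message_count = 3 then "question_2"
    else if message_count = 4 then "question_3"
    else if message_count = 5 then "question_4"
    else if message_count = 6 then "question_5"
    else if message_count = 7 then "analysis"
    else "ongoing"

-- ===== PORT B =====
def pvInitStages : List String :=
  ["greeting", "greeting", "question_1", "question_2", "question_3",
   "question_4", "question_5", "analysis", "ongoing"]

def determine_stage_alt (messages : List (List (String × String))) : String :=
  let stages := messages.foldl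
    (fun st msg => if msg.lookup "role" == some "user" && decide (1 < st.length) then st.tail else st)
    pvInitStages
  stages.getD 0 ""

-- ===== PRECONDITION & SPEC =====
-- Pre_ excludes inputs where some message dict lacks the "role" key: there A (and B) raise KeyError.
def Pre_determine_stage (messages : List (List (String × String))) : Prop :=
  ∀ msg ∈ messages, (msg.lookup "role").isSome
instance (messages : List (List (String × String))) : Decidable (Pre_determine_stage messages) := by unfold Pre_determine_stage; infer_instance
def pvWitness_determine_stage : (List (List (String × String))) := [[("role", "user")], [("role", "assistant")]]
def Spec_determine_stage (messages : List (List (String × String))) (out : String) : Prop := out = determine_stage_alt messages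
instance (messages : List (List (String × String))) (out : String) : Decidable (Spec_determine_stage messages out) := by unfold Spec_determine_stage; infer_instance

-- ===== CLAIM (what is proved, stated in full; the proofs are below) =====
def Claim_equal_determine_stage : Prop := ∀ (messages : List (List (String × String))), Dom_determine_stage messages → Pre_determine_stage messages → Spec_determine_stage messages (determine_stage messages)

-- ===== LEMMAS AND PROOFS =====
-- The state machine's fold starting from stage list s is: drop min(count, |s|-1) stages.
theorem pv_fold (msgs : List (List (String × String))) (s : List String) :
    msgs.foldl
      (fun st msg => if msg.lookup "role" == some "user" && decide (1 < st.length) then st.tail else st) s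
      = s.drop (min (msgs.filter (fun msg => msg.lookup "role" == some "user")).length (s.length - 1)) := by
  induction msgs generalizing s with
  | nil => simp
  | cons m ms ih =>
    simp only [List.foldl_cons, List.filter_cons]
    by_cases hu : (m.lookup "role" == some "user") = true
    · by_cases hl : 1 < s.length
      · rw [if_pos (by simp [hu, hl]), ih s.tail]
        have ht : s.tail = s.drop 1 := (List.drop_one (l := s)).symm
        rw [ht, List.drop_drop]
        simp [hu]
        omega
      · rw [if_neg (by simp [hl]), ih s]
        have h0 : s.length - 1 = 0 := by omega
        simp [hu, h0]
    · rw [if_neg (by simp [hu]), ih s]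
      simp [hu]

-- A's dispatch equals the front of the stage queue after dropping min(n,8) stages.
theorem pv_table (n : Nat) :
    (if n ≤ 1 then "greeting"
     else if n = 2 then "question_1"
     else if n = 3 then "question_2"
     else if n = 4 then "question_3"
     else if n = 5 then "question_4"
     else if n = 6 then "question_5"
     else if n = 7 then "analysis"
     else "ongoing") = (pvInitStages.drop (min n 8)).getD 0 "" := by
  match n with
  | 0 | 1 | 2 | 3 | 4 | 5 | 6 | 7 => decide
  | (k+8) =>
    have h1 : ¬ (k + 8 ≤ 1) := by omega
    have hm : min (k + 8) 8 = 8 := Nat.min_eq_right (by omega)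
    simp only [hm, h1]
    simp only [show k + 8 ≠ 2 by omega, show k + 8 ≠ 3 by omega, show k + 8 ≠ 4 by omega,
      show k + 8 ≠ 5 by omega, show k + 8 ≠ 6 by omega, show k + 8 ≠ 7 by omega]
    decide

-- ===== VERDICT (by name: the statement is the Claim_ definition above) =====
theorem determine_stage_spec : Claim_equal_determine_stage := by
  intro messages _ _
  unfold Spec_determine_stage determine_stage determine_stage_alt
  rw [pv_fold]
  rcases messages with _ | ⟨m, ms⟩
  · decide
  · simp only [if_neg (List.cons_ne_nil m ms)]
    exact pv_table _
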